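-- pv_equiv track=rewrite | github.com/AathavaleHarsh/ragv1 | chunking.py | combine_sentences
-- ===== SOURCE A (Python) =====
-- def combine_sentences(sentences, buffer_size=1):
--     for i in range(len(sentences)):
--         combined_sentence = ''
--
--         # Add sentences before the current one
--         for j in range(i - buffer_size, i):
--             if j >= 0:
--                 combined_sentence += sentences[j]['sentence'] + ' '
--
--         # Add the current sentence
--         combined_sentence += sentences[i]['sentence']
--
--         # Add sentences after the current one
--         for j in range(i + 1, i + 1 + buffer_size):
--             if j < len(sentences):
--                 combined_sentence += ' ' + sentences[j]['sentence']
--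
--         sentences[i]['combined_sentence'] = combined_sentence
--
--     return sentences
-- ===== SOURCE B (Python) =====
-- def combine_sentences(sentences, buffer_size=1):
--     # Mutates each dict in place (same side effect as the original) and returns the list.
--     k = max(0, buffer_size)
--     for i in range(len(sentences)):
--         window = sentences[max(0, i - k): i + 1 + k]
--         sentences[i]['combined_sentence'] = ' '.join(d['sentence'] for d in window)
--     return sentences
-- ===== Notes on version B (the rewrite author's own statement) =====
-- stated objective: simpler
-- what changed: Replaces the three phases (guarded before-loop, current append, guarded after-loop with manual spacing) by one clamped contiguous slice of the window joined with ' ' (negative buffer sizes treated as 0, which is what A computes).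
import Mathlib
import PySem

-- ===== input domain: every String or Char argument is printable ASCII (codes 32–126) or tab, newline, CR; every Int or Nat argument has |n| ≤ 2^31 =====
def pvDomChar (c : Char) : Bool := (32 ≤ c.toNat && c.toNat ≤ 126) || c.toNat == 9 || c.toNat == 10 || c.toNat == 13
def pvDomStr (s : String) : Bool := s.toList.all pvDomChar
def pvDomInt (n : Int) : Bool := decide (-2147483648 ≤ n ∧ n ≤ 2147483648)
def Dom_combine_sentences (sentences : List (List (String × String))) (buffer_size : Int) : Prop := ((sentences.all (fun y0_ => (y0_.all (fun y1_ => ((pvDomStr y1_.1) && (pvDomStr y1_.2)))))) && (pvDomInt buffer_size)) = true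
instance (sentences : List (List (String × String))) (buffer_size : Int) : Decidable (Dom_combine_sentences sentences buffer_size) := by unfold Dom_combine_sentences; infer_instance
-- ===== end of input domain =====

-- B replaces A's three phases (guarded before-loop, current append, guarded after-loop
-- with manual spacing) by one clamped contiguous slice joined with ' ' (objective: simpler).
-- Both programs mutate the dicts in place in Python; the equivalence proved is about the
-- returned list (B performs the same mutation).

-- ===== PORT A =====
-- shared accessors: d['sentence'] (with '' default; Pre_ excludes the KeyError inputs)
-- and the in-place update sentences[i]['combined_sentence'] = v
def pvSentD (d : List (String × String)) : String :=
  ((PySem.Dict.ofList d).get? "sentence").getD ""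

def pvSetAt (sents : List (List (String × String))) (i : Int) (v : String) :
    List (List (String × String)) :=
  sents.set i.toNat
    (((PySem.Dict.ofList (PySem.List.pyGetD sents i [])).insert "combined_sentence" v).items)

def combine_sentences (sentences : List (List (String × String))) (buffer_size : Int) :
    List (List (String × String)) :=
  (PySem.List.pyRange 0 (sentences.length : Int)).foldl
    (fun sents i =>
      let c := (PySem.List.pyRange (i - buffer_size) i).foldl
        (fun acc j => if 0 ≤ j then acc ++ pvSentD (PySem.List.pyGetD sents j []) ++ " " else acc) ""
      let c := c ++ pvSentD (PySem.List.pyGetD sents i [])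
      let c := (PySem.List.pyRange (i + 1) (i + 1 + buffer_size)).foldl
        (fun acc j => if j < (sents.length : Int) then acc ++ " " ++ pvSentD (PySem.List.pyGetD sents j []) else acc) c
      pvSetAt sents i c)
    sentences

-- ===== PORT B =====
def combine_sentences_alt (sentences : List (List (String × String))) (buffer_size : Int) :
    List (List (String × String)) :=
  let k := max 0 buffer_size
  (PySem.List.pyRange 0 (sentences.length : Int)).foldl
    (fun sents i =>
      let window := PySem.List.slice sents (some (max 0 (i - k))) (some (i + 1 + k))
      pvSetAt sents i (PySem.Str.join " " (window.map pvSentD)))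
    sentences

-- ===== PRECONDITION & SPEC =====
-- Pre_ excludes exactly the inputs where Python A raises KeyError: some dict lacking the
-- key 'sentence'.
def Pre_combine_sentences (sentences : List (List (String × String))) (buffer_size : Int) : Prop :=
  ∀ d ∈ sentences, ((PySem.Dict.ofList d).get? "sentence").isSome = true
instance (sentences : List (List (String × String))) (buffer_size : Int) : Decidable (Pre_combine_sentences sentences buffer_size) := by unfold Pre_combine_sentences; infer_instance

def pvWitness_combine_sentences : (List (List (String × String))) × Int :=
  ([[("sentence", "Hello there"), ("idx", "0")], [("sentence", "General Kenobi")]], 1)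

def Spec_combine_sentences (sentences : List (List (String × String))) (buffer_size : Int) (out : List (List (String × String))) : Prop := out = combine_sentences_alt sentences buffer_size
instance (sentences : List (List (String × String))) (buffer_size : Int) (out : List (List (String × String))) : Decidable (Spec_combine_sentences sentences buffer_size out) := by unfold Spec_combine_sentences; infer_instance

-- ===== CLAIM (what is proved, stated in full; the proofs are below) =====
def Claim_equal_combine_sentences : Prop := ∀ (sentences : List (List (String × String))) (buffer_size : Int), Dom_combine_sentences sentences buffer_size → Pre_combine_sentences sentences buffer_size → Spec_combine_sentences sentences buffer_size (combine_sentences sentences buffer_size)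

-- ===== LEMMAS AND PROOFS =====

-- a guarded fold whose guard never fires is the identity
lemma pv_foldl_id {α : Type} (p : α → Prop) [DecidablePred p] (u : String → α → String) :
    ∀ (idxs : List α) (s : String), (∀ j ∈ idxs, ¬ p j) →
      idxs.foldl (fun acc j => if p j then u acc j else acc) s = s := by
  intro idxs
  induction idxs with
  | nil => intro s _; rfl
  | cons a l ih =>
    intro s h
    simp only [List.foldl_cons, if_neg (h a (by simp))]
    exact ih s (fun j hj => h j (by simp [hj]))

-- accumulate-by-append fold, at the character-list level
lemma pv_cat_toList (u : Int → String) :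
    ∀ (idxs : List Int) (s : String),
      (idxs.foldl (fun acc j => acc ++ u j) s).toList
        = s.toList ++ (idxs.map (fun j => (u j).toList)).flatten := by
  intro idxs
  induction idxs with
  | nil => intro s; simp
  | cons a l ih =>
    intro s
    simp only [List.foldl_cons, List.map_cons, List.flatten_cons]
    rw [ih, String.toList_append, List.append_assoc]

-- drop the '0 ≤ j' guard: the range clamps at 0
lemma pv_guard_ge (a c : Int) (u : Int → String) (s : String) :
    (PySem.List.pyRange a c).foldl (fun acc j => if 0 ≤ j then acc ++ u j else acc) s
      = (PySem.List.pyRange (max 0 a) c).foldl (fun acc j => acc ++ u j) s := by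
  by_cases ha : 0 ≤ a
  · rw [max_eq_right ha]
    exact PySem.List.foldl_congr_mem _ _ _ _ (fun acc x hx => by
      rw [if_pos (le_trans ha (PySem.List.mem_pyRange_one.mp hx).1)])
  · push_neg at ha
    rw [max_eq_left (le_of_lt ha)]
    by_cases hc : c ≤ 0
    · rw [pv_foldl_id _ _ _ s (fun j hj => by
        have := (PySem.List.mem_pyRange_one.mp hj).2; omega)]
      rw [PySem.List.pyRange_one_eq_nil hc, List.foldl_nil]
    · push_neg at hc
      rw [PySem.List.pyRange_one_append a 0 c (by omega) (by omega), List.foldl_append]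
      rw [pv_foldl_id _ _ _ s (fun j hj => by
        have := (PySem.List.mem_pyRange_one.mp hj).2; omega)]
      exact PySem.List.foldl_congr_mem _ _ _ _ (fun acc x hx => by
        rw [if_pos (PySem.List.mem_pyRange_one.mp hx).1])

-- drop the 'j < n' guard: the range clamps at n
lemma pv_guard_lt (a c n : Int) (u : Int → String) (s : String) (han : a ≤ n) :
    (PySem.List.pyRange a c).foldl (fun acc j => if j < n then acc ++ u j else acc) s
      = (PySem.List.pyRange a (min c n)).foldl (fun acc j => acc ++ u j) s := by
  by_cases hc : c ≤ n
  · rw [min_eq_left hc]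
    exact PySem.List.foldl_congr_mem _ _ _ _ (fun acc x hx => by
      rw [if_pos (lt_of_lt_of_le (PySem.List.mem_pyRange_one.mp hx).2 hc)])
  · push_neg at hc
    rw [min_eq_right (le_of_lt hc)]
    rw [PySem.List.pyRange_one_append a n c han (le_of_lt hc), List.foldl_append]
    rw [show ((PySem.List.pyRange a n).foldl (fun acc j => if j < n then acc ++ u j else acc) s)
        = (PySem.List.pyRange a n).foldl (fun acc j => acc ++ u j) s from
      PySem.List.foldl_congr_mem _ _ _ _ (fun acc x hx => by
        rw [if_pos (PySem.List.mem_pyRange_one.mp hx).2])]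
    exact pv_foldl_id _ _ _ _ (fun j hj => by
      have := (PySem.List.mem_pyRange_one.mp hj).1; omega)

-- a clamped slice is the map of indexing over the clamped index range
lemma pv_slice_eq_map {α : Type} (d : α) (L : List α) (a c : Int)
    (h0 : 0 ≤ a) (hac : a ≤ c) (han : a ≤ (L.length : Int)) :
    PySem.List.slice L (some a) (some c)
      = (PySem.List.pyRange a (min c (L.length : Int))).map (fun j => PySem.List.pyGetD L j d) := by
  rw [PySem.List.slice_toNat L h0 (by omega)]
  apply List.ext_getElem
  · simp [PySem.List.length_pyRange_one]; omega
  · intro t h1 h2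
    simp only [List.getElem_take, List.getElem_drop, List.getElem_map,
      PySem.List.getElem_pyRange_one]
    rw [PySem.List.pyGetD_eq_getElem L d (by omega) (by
      simp [PySem.List.length_pyRange_one] at h2; omega)]
    congr 1
    omega

-- ' '.join of a nonempty list, head and spaced tail
lemma pv_join_head (sp : List Char) :
    ∀ (zs : List (List Char)) (y : List Char),
      PySem.Chars.join sp (y :: zs) = y ++ (zs.map (fun z => sp ++ z)).flatten := by
  intro zs
  induction zs with
  | nil => intro y; simp [PySem.Chars.join_singleton]
  | cons z l ih =>
    intro y
    rw [PySem.Chars.join_cons_cons, ih z]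
    simp [List.append_assoc]

-- ' '.join split around a distinguished element
lemma pv_join_split (sp : List Char) :
    ∀ (xs : List (List Char)) (y : List Char) (zs : List (List Char)),
      PySem.Chars.join sp (xs ++ y :: zs)
        = (xs.map (fun x => x ++ sp)).flatten ++ y ++ (zs.map (fun z => sp ++ z)).flatten := by
  intro xs
  induction xs with
  | nil => intro y zs; simp [pv_join_head]
  | cons x l ih =>
    intro y zs
    have hne : l ++ y :: zs ≠ [] := by simp
    rw [List.cons_append]
    cases h : l ++ y :: zs with
    | nil => exact absurd h hne
    | cons q rest =>
      rw [PySem.Chars.join_cons_cons, ← h, ih y zs]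
      simp [List.append_assoc]

-- the per-index combined string: A's three phases equal B's slice-and-join
lemma pv_combined (L : List (List (String × String))) (b i : Int)
    (h0 : 0 ≤ i) (h1 : i < (L.length : Int)) :
    ((PySem.List.pyRange (i + 1) (i + 1 + b)).foldl
        (fun acc j => if j < (L.length : Int) then acc ++ " " ++ pvSentD (PySem.List.pyGetD L j []) else acc)
        (((PySem.List.pyRange (i - b) i).foldl
            (fun acc j => if 0 ≤ j then acc ++ pvSentD (PySem.List.pyGetD L j []) ++ " " else acc) "")
          ++ pvSentD (PySem.List.pyGetD L i [])))
      = PySem.Str.join " "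
          ((PySem.List.slice L (some (max 0 (i - max 0 b))) (some (i + 1 + max 0 b))).map pvSentD) := by
  set n : Int := (L.length : Int) with hn
  set k : Int := max 0 b with hk
  have hk0 : 0 ≤ k := le_max_left _ _
  have hlo0 : 0 ≤ max 0 (i - k) := le_max_left _ _
  have hloi : max 0 (i - k) ≤ i := by omega
  have hhi : i < min (i + 1 + k) n := by omega
  apply String.toList_inj.mp
  -- right-hand side: slice → index range → split around i → join split
  rw [PySem.Str.toList_join,
    pv_slice_eq_map [] L (max 0 (i - k)) (i + 1 + k) hlo0 (by omega) (by omega)]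
  rw [PySem.List.pyRange_one_append (max 0 (i - k)) i (min (i + 1 + k) n) hloi (by omega),
    PySem.List.pyRange_one_cons hhi]
  simp only [List.map_append, List.map_cons]
  rw [pv_join_split]
  -- left-hand side: drop the guards, then linearise the folds
  have hb : ∀ (acc : String) (j : Int),
      (if 0 ≤ j then acc ++ pvSentD (PySem.List.pyGetD L j []) ++ " " else acc)
      = (if 0 ≤ j then acc ++ (pvSentD (PySem.List.pyGetD L j []) ++ " ") else acc) := by
    intro acc j; split_ifs <;> simp [String.append_assoc]
  simp only [hb]
  rw [pv_guard_ge (i - b) i (fun j => pvSentD (PySem.List.pyGetD L j []) ++ " ") ""]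
  have hb2 : ∀ (acc : String) (j : Int),
      (if j < n then acc ++ " " ++ pvSentD (PySem.List.pyGetD L j []) else acc)
      = (if j < n then acc ++ (" " ++ pvSentD (PySem.List.pyGetD L j [])) else acc) := by
    intro acc j; split_ifs <;> simp [String.append_assoc]
  simp only [hb2]
  rw [pv_guard_lt (i + 1) (i + 1 + b) n (fun j => " " ++ pvSentD (PySem.List.pyGetD L j [])) _ (by omega)]
  rw [pv_cat_toList, String.toList_append, pv_cat_toList]
  have hrange_before : PySem.List.pyRange (max 0 (i - b)) i = PySem.List.pyRange (max 0 (i - k)) i := by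
    by_cases hbneg : 0 ≤ b
    · rw [hk, max_eq_right hbneg]
    · push_neg at hbneg
      rw [PySem.List.pyRange_one_eq_nil (by omega), PySem.List.pyRange_one_eq_nil (by omega)]
  have hrange_after : PySem.List.pyRange (i + 1) (min (i + 1 + b) n)
      = PySem.List.pyRange (i + 1) (min (i + 1 + k) n) := by
    by_cases hbneg : 0 ≤ b
    · rw [hk, max_eq_right hbneg]
    · push_neg at hbneg
      rw [PySem.List.pyRange_one_eq_nil (by omega), PySem.List.pyRange_one_eq_nil (by omega)]
  rw [hrange_before, hrange_after]
  simp only [List.map_map, Function.comp_def, String.toList_append, List.append_assoc]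
  simp

-- the two step functions agree and preserve length; hence the folds agree
-- proof-side names for the two loop bodies (definitionally the ports' lambdas)
def pvStepA (b : Int) (sents : List (List (String × String))) (i : Int) :
    List (List (String × String)) :=
  let c := (PySem.List.pyRange (i - b) i).foldl
    (fun acc j => if 0 ≤ j then acc ++ pvSentD (PySem.List.pyGetD sents j []) ++ " " else acc) ""
  let c := c ++ pvSentD (PySem.List.pyGetD sents i [])
  let c := (PySem.List.pyRange (i + 1) (i + 1 + b)).foldl
    (fun acc j => if j < (sents.length : Int) then acc ++ " " ++ pvSentD (PySem.List.pyGetD sents j []) else acc) c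
  pvSetAt sents i c

def pvStepB (b : Int) (sents : List (List (String × String))) (i : Int) :
    List (List (String × String)) :=
  let window := PySem.List.slice sents (some (max 0 (i - max 0 b))) (some (i + 1 + max 0 b))
  pvSetAt sents i (PySem.Str.join " " (window.map pvSentD))

lemma pv_stepA_eq_stepB (b : Int) (L : List (List (String × String))) (a : Int)
    (h0 : 0 ≤ a) (h1 : a < (L.length : Int)) : pvStepA b L a = pvStepB b L a := by
  show pvSetAt L a _ = pvSetAt L a _
  exact congrArg _ (pv_combined L b a h0 h1)

lemma pv_stepB_length (b : Int) (L : List (List (String × String))) (a : Int) :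
    ((pvStepB b L a).length : Int) = (L.length : Int) := by
  simp [pvStepB, pvSetAt]

lemma pv_fold_eq (b : Int) :
    ∀ (idxs : List Int) (L : List (List (String × String))),
      (∀ i ∈ idxs, 0 ≤ i ∧ i < (L.length : Int)) →
      idxs.foldl (pvStepA b) L = idxs.foldl (pvStepB b) L := by
  intro idxs
  induction idxs with
  | nil => intro L _; rfl
  | cons a l ih =>
    intro L h
    obtain ⟨ha0, ha1⟩ := h a (by simp)
    rw [List.foldl_cons, List.foldl_cons, pv_stepA_eq_stepB b L a ha0 ha1]
    apply ih
    intro i hi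
    have := h i (by simp [hi])
    rwa [← pv_stepB_length b L a] at this

-- ===== VERDICT (by name: the statement is the Claim_ definition above) =====
theorem combine_sentences_spec : Claim_equal_combine_sentences := by
  intro sentences buffer_size _ _
  unfold Spec_combine_sentences combine_sentences combine_sentences_alt
  show (PySem.List.pyRange 0 (sentences.length : Int)).foldl (pvStepA buffer_size) sentences
      = (PySem.List.pyRange 0 (sentences.length : Int)).foldl (pvStepB buffer_size) sentences
  exact pv_fold_eq buffer_size _ sentences
    (fun i hi => PySem.List.mem_pyRange_one.mp hi)
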